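-- pv_equiv track=rewrite | github.com/Rimann91/Text-Adventure-Engine | adventure.py | proper_list_from_dict
-- ===== SOURCE A (Python) =====
-- def add_article ( name ):
--   # simple plural test
--   if len(name) > 1 and name[len(name)-1] == 's' and name[len(name)-2] != 's':
--     return name
--   consonants = "bcdfghjklmnpqrstvwxyz"
--   vowels = "aeiou"
--   if name and (name[0] in vowels):
--      article = "an "
--   elif name and (name[0] in consonants):
--      article = "a "
--   else:
--      article = ""
--   return "%s%s" % (article, name)
--
-- def proper_list_from_dict( d ):
--   names = list(d.keys())
--   buf = []
--   name_count = len(names)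
--   for (i,name) in enumerate(names):
--     if i != 0:
--       buf.append(", " if name_count > 2 else " ")
--     if i == name_count-1 and name_count > 1:
--       buf.append("and ")
--     buf.append(add_article(name))
--   return "".join(buf)
-- ===== SOURCE B (Python) =====
-- def add_article(name):
--     if not name:
--         return ""
--     if len(name) > 1 and name.endswith("s") and not name.endswith("ss"):
--         return name
--     c = name[0]
--     if c in "aeiou":
--         return "an " + name
--     if c in "bcdfghjklmnpqrstvwxyz":
--         return "a " + name
--     return name
--
-- def proper_list_from_dict(d):
--     parts = [add_article(n) for n in d]
--     if not parts:
--         return ""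
--     if len(parts) == 1:
--         return parts[0]
--     if len(parts) == 2:
--         return parts[0] + " and " + parts[1]
--     return ", ".join(parts[:-1]) + ", and " + parts[-1]
-- ===== Notes on version B (the rewrite author's own statement) =====
-- stated objective: simpler
-- what changed: B formats all names first and assembles the sentence by a count-based dispatch (empty/one/'x and y'/join with Oxford comma) instead of A's per-iteration inline insertion of separators and the 'and ' prefix inside the loop.
import Mathlib
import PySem

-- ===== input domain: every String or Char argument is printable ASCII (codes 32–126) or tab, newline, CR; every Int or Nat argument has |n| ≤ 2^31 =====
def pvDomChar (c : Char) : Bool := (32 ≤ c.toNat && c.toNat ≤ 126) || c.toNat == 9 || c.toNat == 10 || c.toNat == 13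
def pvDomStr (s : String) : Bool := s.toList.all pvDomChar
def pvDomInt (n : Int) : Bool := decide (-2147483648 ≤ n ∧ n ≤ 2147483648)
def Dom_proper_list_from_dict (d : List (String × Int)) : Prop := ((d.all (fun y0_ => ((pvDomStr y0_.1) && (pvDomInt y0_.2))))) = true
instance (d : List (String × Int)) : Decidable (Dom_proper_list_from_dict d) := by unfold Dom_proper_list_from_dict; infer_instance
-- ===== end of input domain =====

-- B assembles the sentence by a count-based dispatch over the pre-formatted name list
-- (join for 3+, a direct "x and y" for 2) instead of A's per-iteration separator/"and " insertion; objective: simpler.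

-- ===== PORT A =====
-- name[0] in vowels : name[0] is a 1-char string, 'in' on single-char strings of a
-- duplicate-free alphabet string is char membership; ported as first-char membership.
def pvFirstIn (name chars : String) : Bool :=
  match PySem.Str.pyGet? name 0 with
  | some c => chars.toList.contains c
  | none => false

def add_article (name : String) : String :=
  if PySem.Str.len name > 1 ∧
     PySem.Str.pyGet? name (PySem.Str.len name - 1) = some 's' ∧
     PySem.Str.pyGet? name (PySem.Str.len name - 2) ≠ some 's' then name
  else
    let consonants := "bcdfghjklmnpqrstvwxyz"
    let vowels := "aeiou"
    let article :=
      if name ≠ "" ∧ pvFirstIn name vowels = true then "an "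
      else if name ≠ "" ∧ pvFirstIn name consonants = true then "a "
      else ""
    article ++ name

def proper_list_from_dict (d : List (String × Int)) : String :=
  let names := PySem.List.dedup (d.map Prod.fst)   -- list(d.keys())
  let name_count : Int := names.length
  let buf := (PySem.List.enumerate names).foldl (fun buf p =>
    let buf := if p.1 ≠ 0 then buf ++ [if name_count > 2 then ", " else " "] else buf
    let buf := if p.1 = name_count - 1 ∧ name_count > 1 then buf ++ ["and "] else buf
    buf ++ [add_article p.2]) []
  PySem.Str.join "" buf

-- ===== PORT B =====
def add_article_alt (name : String) : String :=
  if name = "" then ""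
  else if PySem.Str.len name > 1 ∧ PySem.Str.endswith name "s" = true ∧
          ¬ PySem.Str.endswith name "ss" = true then name
  else
    let c := name.toList.headD ' '   -- name[0]; name ≠ "" here
    if ("aeiou".toList).contains c then "an " ++ name
    else if ("bcdfghjklmnpqrstvwxyz".toList).contains c then "a " ++ name
    else name

def proper_list_from_dict_alt (d : List (String × Int)) : String :=
  let parts := (PySem.List.dedup (d.map Prod.fst)).map add_article_alt
  if parts.length = 0 then ""
  else if parts.length = 1 then parts.headD ""
  else if parts.length = 2 then parts.headD "" ++ " and " ++ parts.getLastD ""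
  else PySem.Str.join ", " parts.dropLast ++ ", and " ++ parts.getLastD ""

-- ===== PRECONDITION & SPEC =====
def Spec_proper_list_from_dict (d : List (String × Int)) (out : String) : Prop := out = proper_list_from_dict_alt d
instance (d : List (String × Int)) (out : String) : Decidable (Spec_proper_list_from_dict d out) := by unfold Spec_proper_list_from_dict; infer_instance

-- ===== CLAIM (what is proved, stated in full; the proofs are below) =====
def Claim_equal_proper_list_from_dict : Prop := ∀ (d : List (String × Int)), Dom_proper_list_from_dict d → Spec_proper_list_from_dict d (proper_list_from_dict d)

-- ===== LEMMAS AND PROOFS =====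

theorem suff1 (l : List Char) (z : Char) : (['s'] <:+ l ++ [z]) ↔ z = 's' := by
  simp [List.suffix_iff_eq_drop, eq_comm]
theorem suff2 (l : List Char) (y z : Char) : (['s','s'] <:+ l ++ [y, z]) ↔ y = 's' ∧ z = 's' := by
  rw [List.suffix_iff_eq_drop]
  rw [show (l ++ [y, z]).length - ['s','s'].length = l.length by simp]
  rw [List.drop_left' rfl]
  simp [eq_comm]
theorem ew2 (l : List Char) (y z : Char) (s : String) (h : s.toList = l ++ [y, z]) :
    PySem.Str.endswith s "ss" = decide (y = 's' ∧ z = 's') := by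
  rw [Bool.eq_iff_iff]
  simp only [decide_eq_true_eq]
  rw [show (PySem.Str.endswith s "ss" = true) ↔ ("ss".toList <:+ s.toList) by
      simp [PySem.Chars.endswith_iff]]
  rw [h]; exact suff2 l y z
theorem ew1 (l : List Char) (z : Char) (s : String) (h : s.toList = l ++ [z]) :
    PySem.Str.endswith s "s" = decide (z = 's') := by
  rw [Bool.eq_iff_iff]
  simp only [decide_eq_true_eq]
  rw [show (PySem.Str.endswith s "s" = true) ↔ ("s".toList <:+ s.toList) by
      simp [PySem.Chars.endswith_iff]]
  rw [h]; exact suff1 l z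
theorem gA1 (l : List Char) (z : Char) (s : String) (h : s.toList = l ++ [z]) :
    PySem.Str.pyGet? s (PySem.Str.len s - 1) = some z := by
  simp only [PySem.Str.pyGet?_eq, PySem.Str.len_eq, PySem.Chars.pyGet?_eq_listPyGet?, h]
  rw [show (((l ++ [z]).length : Int) - 1) = ((l.length : Nat) : Int) by simp,
     PySem.List.pyGet?_natCast]
  simp
theorem gA2 (l : List Char) (y z : Char) (s : String) (h : s.toList = l ++ [y, z]) :
    PySem.Str.pyGet? s (PySem.Str.len s - 2) = some y := by
  simp only [PySem.Str.pyGet?_eq, PySem.Str.len_eq, PySem.Chars.pyGet?_eq_listPyGet?, h]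
  rw [show (((l ++ [y, z]).length : Int) - 2) = ((l.length : Nat) : Int) by simp,
     PySem.List.pyGet?_natCast]
  simp
theorem g0 (s : String) (h : s.toList ≠ []) :
    PySem.Str.pyGet? s 0 = some (s.toList.headD ' ') := by
  simp only [PySem.Str.pyGet?_eq, PySem.Chars.pyGet?_eq_listPyGet?]
  rw [show (0 : Int) = ((0 : Nat) : Int) by rfl, PySem.List.pyGet?_natCast]
  cases hc : s.toList with
  | nil => exact absurd hc h
  | cons a t => simp

theorem add_article_agree (name : String) : add_article_alt name = add_article name := by
  by_cases h0 : name = ""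
  · subst h0; simp [add_article, add_article_alt, pvFirstIn]
  · have hne : name.toList ≠ [] := by
      intro hc; exact h0 (by cases name with | _ => simp_all)
    unfold add_article add_article_alt pvFirstIn
    rw [g0 name hne]
    rcases List.eq_nil_or_concat name.toList with hnil | ⟨l, z, hlz⟩
    · exact absurd hnil hne
    rcases List.eq_nil_or_concat l with rfl | ⟨l', y, rfl⟩
    · -- single char: name.toList = [z]
      have hlen : PySem.Str.len name = 1 := by simp [hlz]
      have hlz' : name.toList = [z] := by simpa using hlz
      simp only [hlen, h0]
      norm_num
      simp only [hlz']
      split_ifs <;> simp_all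
    · -- at least two chars: name.toList = l' ++ [y, z]
      have hyz : name.toList = l' ++ [y, z] := by simpa using hlz
      have hlz' : name.toList = (l' ++ [y]) ++ [z] := by simpa using hlz
      have hlen : PySem.Str.len name = (l'.length : Int) + 2 := by
        simp [hyz]
      rw [gA1 _ _ _ hlz', gA2 _ _ _ _ hyz, ew1 _ _ _ hlz', ew2 _ _ _ _ hyz]
      by_cases hz : z = 's' <;> by_cases hy : y = 's' <;>
        simp_all [PySem.Str.len_eq] <;> split_ifs <;> simp_all

theorem joinNil (l : List (List Char)) : PySem.Chars.join [] l = l.flatten := by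
  induction l with
  | nil => simp [PySem.Chars.join_nil]
  | cons a t ih =>
    cases t with
    | nil => simp [PySem.Chars.join_singleton]
    | cons b u => rw [PySem.Chars.join_cons_cons]; simp_all

theorem joinCons (sep x : List Char) (l : List (List Char)) :
    PySem.Chars.join sep (x :: l) = x ++ l.flatMap (fun y => sep ++ y) := by
  induction l generalizing x with
  | nil => simp [PySem.Chars.join_singleton]
  | cons b u ih => rw [PySem.Chars.join_cons_cons]; simp_all

-- the loop body of A as segment function
def pvSeg (f : String → String) (n : Int) (p : Int × String) : List String :=
  (if p.1 ≠ 0 then [if n > 2 then ", " else " "] else []) ++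
  (if p.1 = n - 1 ∧ n > 1 then ["and "] else []) ++ [f p.2]

theorem foldl_body_eq (f : String → String) (n : Int) (l : List (Int × String)) (init : List String) :
    l.foldl (fun buf p =>
      let buf := if p.1 ≠ 0 then buf ++ [if n > 2 then ", " else " "] else buf
      let buf := if p.1 = n - 1 ∧ n > 1 then buf ++ ["and "] else buf
      buf ++ [f p.2]) init = init ++ l.flatMap (pvSeg f n) := by
  rw [show (fun buf (p : Int × String) =>
      let buf := if p.1 ≠ 0 then buf ++ [if n > 2 then ", " else " "] else buf
      let buf := if p.1 = n - 1 ∧ n > 1 then buf ++ ["and "] else buf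
      buf ++ [f p.2]) = fun buf p => buf ++ pvSeg f n p by
    funext buf p; simp only [pvSeg]; split_ifs <;> simp]
  exact PySem.List.foldl_append_eq_flatMap _ _ _

theorem tailFlat (f : String → String) (m : List String) (zs : String) (i n : Int)
    (h1 : 1 ≤ i) (h2 : i + m.length + 1 = n) (h3 : 2 < n) :
    (PySem.List.enumerate (m ++ [zs]) i).flatMap (pvSeg f n) =
      m.flatMap (fun x => [", ", f x]) ++ [", ", "and ", f zs] := by
  induction m generalizing i with
  | nil =>
    simp at h2
    simp [PySem.List.enumerate_cons, PySem.List.enumerate_nil, pvSeg,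
          show i = n - 1 by omega, show ¬(n - 1 = 0) by omega, h3,
          show (1:Int) < n by omega]
  | cons a t ih =>
    simp only [List.cons_append, PySem.List.enumerate_cons, List.flatMap_cons]
    rw [ih (i + 1) (by omega) (by simp at h2 ⊢; omega)]
    have : pvSeg f n (i, a) = [", ", f a] := by
      simp only [pvSeg]
      simp [show i ≠ 0 by omega, show ¬(i = n - 1) by simp at h2; omega, h3]
    rw [this]; simp

theorem dropLast_cons_concat {α : Type} (x y : α) (l : List α) :
    (x :: (l ++ [y])).dropLast = x :: l := by
  rw [List.dropLast_cons_of_ne_nil (by simp)]; simp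

theorem getLast?_cons_concat {α : Type} (x y : α) (l : List α) :
    (x :: (l ++ [y])).getLast? = some y := by
  induction l generalizing x <;> simp_all [List.getLast?_cons]

theorem flatten_pairSeg (g : String → List Char) (mt : List String) :
    (mt.flatMap (fun a => [[',',' '], g a])).flatten = mt.flatMap (fun a => ',' :: ' ' :: g a) := by
  induction mt <;> simp_all

theorem assemble_core (f : String → String) (names : List String) :
    PySem.Str.join "" ((PySem.List.enumerate names).foldl (fun buf p =>
      let buf := if p.1 ≠ 0 then buf ++ [if (names.length : Int) > 2 then ", " else " "] else buf
      let buf := if p.1 = (names.length : Int) - 1 ∧ (names.length : Int) > 1 then buf ++ ["and "] else buf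
      buf ++ [f p.2]) []) =
    (let parts := names.map f
     if parts.length = 0 then ""
     else if parts.length = 1 then parts.headD ""
     else if parts.length = 2 then parts.headD "" ++ " and " ++ parts.getLastD ""
     else PySem.Str.join ", " parts.dropLast ++ ", and " ++ parts.getLastD "") := by
  rw [foldl_body_eq]
  match names with
  | [] =>
    apply String.toList_inj.mp
    simp [PySem.List.enumerate_nil]
  | [a] =>
    apply String.toList_inj.mp
    simp [PySem.List.enumerate_cons, PySem.List.enumerate_nil, pvSeg]
  | [a, b] =>
    apply String.toList_inj.mp
    simp [joinNil, PySem.List.enumerate_cons, PySem.List.enumerate_nil, pvSeg]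
  | a :: b :: c :: t =>
    obtain ⟨m, zl, hm⟩ := (List.eq_nil_or_concat (b :: c :: t)).resolve_left (by simp)
    have hm' : b :: c :: t = m ++ [zl] := by simpa using hm
    match m, hm' with
    | m0 :: mt, hm' =>
    rw [hm']
    have hseg0 : pvSeg f ((a :: ((m0 :: mt) ++ [zl])).length : Int) (0, a) = [f a] := by
      simp [pvSeg]
      omega
    rw [PySem.List.enumerate_cons, List.flatMap_cons, hseg0]
    rw [show (0:Int) + 1 = 1 by norm_num]
    rw [tailFlat f (m0 :: mt) zl 1 ((a :: ((m0 :: mt) ++ [zl])).length : Int)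
          (by omega) (by simp; ring) (by simp; omega)]
    apply String.toList_inj.mp
    simp [joinCons, List.map_flatMap, Function.comp,
          dropLast_cons_concat, getLast?_cons_concat, flatten_pairSeg, List.flatMap_map]

theorem assemble_agree (names : List String) :
    PySem.Str.join "" ((PySem.List.enumerate names).foldl (fun buf p =>
      let buf := if p.1 ≠ 0 then buf ++ [if (names.length : Int) > 2 then ", " else " "] else buf
      let buf := if p.1 = (names.length : Int) - 1 ∧ (names.length : Int) > 1 then buf ++ ["and "] else buf
      buf ++ [add_article p.2]) []) =
    (let parts := names.map add_article_alt
     if parts.length = 0 then ""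
     else if parts.length = 1 then parts.headD ""
     else if parts.length = 2 then parts.headD "" ++ " and " ++ parts.getLastD ""
     else PySem.Str.join ", " parts.dropLast ++ ", and " ++ parts.getLastD "") := by
  have hmap : names.map add_article_alt = names.map add_article :=
    List.map_congr_left (fun x _ => add_article_agree x)
  simp only [hmap]
  exact assemble_core add_article names

-- ===== VERDICT (by name: the statement is the Claim_ definition above) =====
theorem proper_list_from_dict_spec : Claim_equal_proper_list_from_dict := by
  intro d _
  unfold Spec_proper_list_from_dict proper_list_from_dict proper_list_from_dict_alt
  exact assemble_agree (PySem.List.dedup (d.map Prod.fst))
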